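-- pv_equiv track=rewrite | github.com/Ahmed-Mohiuddin-Shah/OCR-Backend | PaddleOCR/tools/infer/helpers.py | most_common_name_and_cnic
-- ===== SOURCE A (Python) =====
-- from typing import Counter
--
-- def most_common_name_and_cnic(data):
--     # Separate names and CNICs into their own lists
--     names = [name for name, cnic in data]
--     cnics = [cnic for name, cnic in data]
--
--     # Use Counter to count occurrences
--     name_counter = Counter(names)
--     cnic_counter = Counter(cnics)
--
--     # Find the most common name and CNIC
--     most_common_name = name_counter.most_common(1)
--     most_common_cnic = cnic_counter.most_common(1)
--
--     # Return the most common name and CNIC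
--     return most_common_name[0] if most_common_name else (None, 0), most_common_cnic[0] if most_common_cnic else (None, 0)
-- ===== SOURCE B (Python) =====
-- def most_common_name_and_cnic(data):
--     # Brute force: no Counter and no count dict at all.  For each first
--     # occurrence (tracked by a `seen` list) compute its frequency with a
--     # full xs.count(x) rescan; keep the best only on a STRICT increase,
--     # so the first-encountered key wins ties (= most_common's rule).
--     def best(xs):
--         top = None
--         seen = []
--         for x in xs:
--             if x in seen:
--                 continue
--             seen.append(x)
--             c = xs.count(x)
--             if top is None or c > top[1]:
--                 top = (x, c)
--         return top if top is not None else (None, 0)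
--
--     names = [name for name, cnic in data]
--     cnics = [cnic for name, cnic in data]
--     return best(names), best(cnics)
-- ===== Notes on version B (the rewrite author's own statement) =====
-- stated objective: alternative
-- what changed: Drops Counter (and any count table) entirely: a brute-force scan visits each first occurrence (tracked by a seen list) and computes its frequency by a full xs.count(x) rescan, keeping the running best on a strict increase; trades A's O(n) hash counting for a structure-free quadratic scan.
import Mathlib
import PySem

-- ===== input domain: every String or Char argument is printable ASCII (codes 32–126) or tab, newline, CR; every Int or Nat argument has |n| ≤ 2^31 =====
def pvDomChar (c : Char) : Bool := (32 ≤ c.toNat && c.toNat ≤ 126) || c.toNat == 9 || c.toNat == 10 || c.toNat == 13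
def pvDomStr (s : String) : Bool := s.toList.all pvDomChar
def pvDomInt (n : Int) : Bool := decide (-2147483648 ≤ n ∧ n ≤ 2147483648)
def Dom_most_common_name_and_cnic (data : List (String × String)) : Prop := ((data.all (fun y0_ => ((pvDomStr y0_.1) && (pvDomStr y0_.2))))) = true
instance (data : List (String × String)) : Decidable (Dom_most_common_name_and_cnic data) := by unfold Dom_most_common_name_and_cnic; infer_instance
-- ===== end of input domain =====

-- B drops Counter entirely: a brute-force scan over first occurrences (a `seen` list)
-- recomputing each frequency with a full xs.count rescan (objective: alternative; not faster).


-- ===== PORT A =====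
def most_common_name_and_cnic (data : List (String × String)) : (Option String × Int) × (Option String × Int) :=
  let names := data.map (fun p => p.1)
  let cnics := data.map (fun p => p.2)
  let name_counter := PySem.Dict.counter names
  let cnic_counter := PySem.Dict.counter cnics
  -- Counter.most_common(1) = the first item of maximal count, in first-occurrence order
  let most_common_name := PySem.List.max? name_counter.items (fun kv => kv.2)
  let most_common_cnic := PySem.List.max? cnic_counter.items (fun kv => kv.2)
  ((match most_common_name with
    | some (k, c) => (some k, c)
    | none => (none, 0)),
   (match most_common_cnic with
    | some (k, c) => (some k, c)
    | none => (none, 0)))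

-- ===== PORT B =====
-- Source B's `best`: one loop over xs carrying (seen, top); skip if x ∈ seen, else
-- append to seen, recount x over the whole list, update top on strict increase.
def pvBest (xs : List String) : Option String × Int :=
  let st := xs.foldl
    (fun st x =>
      if x ∈ st.1 then st
      else
        let c : Int := PySem.List.count xs x
        (st.1 ++ [x],
         match st.2 with
         | none => some (x, c)
         | some b => if c > b.2 then some (x, c) else some b))
    (([] : List String), (none : Option (String × Int)))
  match st.2 with
  | some (k, c) => (some k, c)
  | none => (none, 0)

def most_common_name_and_cnic_alt (data : List (String × String)) : (Option String × Int) × (Option String × Int) :=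
  let names := data.map (fun p => p.1)
  let cnics := data.map (fun p => p.2)
  (pvBest names, pvBest cnics)

-- ===== PRECONDITION & SPEC =====
def Spec_most_common_name_and_cnic (data : List (String × String)) (out : (Option String × Int) × (Option String × Int)) : Prop := out = most_common_name_and_cnic_alt data
instance (data : List (String × String)) (out : (Option String × Int) × (Option String × Int)) : Decidable (Spec_most_common_name_and_cnic data out) := by unfold Spec_most_common_name_and_cnic; infer_instance

-- ===== CLAIM =====
def Claim_equal_most_common_name_and_cnic : Prop := ∀ (data : List (String × String)), Dom_most_common_name_and_cnic data → Spec_most_common_name_and_cnic data (most_common_name_and_cnic data)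

-- ===== LEMMAS AND PROOFS =====

-- the strict-increase selection step shared by both analyses
def pvG (a : Option (String × Int)) (kv : String × Int) : Option (String × Int) :=
  match a with
  | none => some kv
  | some b => if kv.2 > b.2 then some kv else some b

-- the elements of xs not in `seen`, first occurrences in order
def pvNew (xs : List String) (seen : List String) : List String :=
  match xs with
  | [] => []
  | x :: t => if x ∈ seen then pvNew t seen else x :: pvNew t (seen ++ [x])

-- B's loop with ANY (seen, top) state = seen extended by the new elements, and pvG folded over them
theorem pvBest_fold (c : String → Int) (xs : List String) (seen : List String)
    (acc : Option (String × Int)) :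
    xs.foldl
      (fun st x =>
        if x ∈ st.1 then st
        else (st.1 ++ [x], pvG st.2 (x, c x)))
      (seen, acc)
    = (seen ++ pvNew xs seen, (pvNew xs seen).foldl (fun a k => pvG a (k, c k)) acc) := by
  induction xs generalizing seen acc with
  | nil => simp [pvNew]
  | cons x t ih =>
    by_cases hx : x ∈ seen
    · simp [pvNew, hx, ih]
    · simp [pvNew, hx, ih, List.append_assoc]

-- the set-of-first-occurrences is exactly pvNew from the empty seen list
theorem foldl_add_eq_pvNew (xs : List String) (seen : List String) :
    xs.foldl PySem.Set.add seen = seen ++ pvNew xs seen := by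
  induction xs generalizing seen with
  | nil => simp [pvNew]
  | cons x t ih =>
    by_cases hx : x ∈ seen
    · simp [pvNew, hx, ih, PySem.Set.add, PySem.Set.contains]
    · simp [pvNew, hx, ih, PySem.Set.add, PySem.Set.contains, List.append_assoc]

theorem ofList_eq_pvNew (xs : List String) :
    PySem.Set.ofList xs = pvNew xs [] := by
  have h := foldl_add_eq_pvNew xs []
  simpa [PySem.Set.ofList_eq_foldl] using h

-- A's max?-then-default on a pair list is the pvG fold followed by the same default
theorem pvSelect_eq (l : List (String × Int)) :
    (match PySem.List.max? l (fun kv => kv.2) with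
     | some (k, c) => ((some k : Option String), c)
     | none => (none, 0))
    = (match l.foldl pvG none with
       | some (k, c) => ((some k : Option String), c)
       | none => (none, 0)) := by
  simp only [PySem.List.max?]
  congr 2
  funext a x
  cases a <;> rfl

-- pvBest xs = A's selection over (counter xs).items
theorem pvBest_eq_counter (xs : List String) :
    pvBest xs
    = (match PySem.List.max? (PySem.Dict.counter xs).items (fun kv => kv.2) with
       | some (k, c) => ((some k : Option String), c)
       | none => (none, 0)) := by
  rw [pvSelect_eq, PySem.Dict.items_counter, List.foldl_map]
  show (match (xs.foldl (fun st x =>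
        if x ∈ st.1 then st
        else (st.1 ++ [x], pvG st.2 (x, (PySem.List.count xs x : Int))))
        (([] : List String), (none : Option (String × Int)))).2 with
       | some (k, c) => ((some k : Option String), c)
       | none => (none, 0)) = _
  rw [pvBest_fold (fun x => (PySem.List.count xs x : Int)) xs [] none]
  simp [ofList_eq_pvNew, PySem.List.count_eq]

-- ===== VERDICT =====
theorem most_common_name_and_cnic_spec : Claim_equal_most_common_name_and_cnic := by
  intro data _
  show most_common_name_and_cnic data = most_common_name_and_cnic_alt data
  simp only [most_common_name_and_cnic, most_common_name_and_cnic_alt,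
    pvBest_eq_counter]
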